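-- pv_equiv track=rewrite | github.com/cornstarch-org/Cornstarch | tests/test_plugins/multimodal_parallel_plugin/test_multimodal_parallel_plugin.py | check_layers_cover_all_params
-- ===== SOURCE A (Python) =====
-- def check_layers_cover_all_params(
--     layer_names: list[str], param_names: list[str]
-- ):
--     used_prefixes = set()
--     for param_name in param_names:
--         covered = False
--         for layer_name in layer_names:
--             if param_name.startswith(layer_name):
--                 used_prefixes.add(layer_name)
--                 covered = True
--                 break
--         if not covered:
--             return False
--
--     return sorted(used_prefixes) == sorted(set(layer_names))
-- ===== SOURCE B (Python) =====
-- def check_layers_cover_all_params(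
--     layer_names: list[str], param_names: list[str]
-- ):
--     # Hash-index the layer names by first occurrence, then for each param scan its
--     # own prefixes (len(param)+1 lookups) instead of scanning the whole layer list.
--     first_index = {}
--     for i, name in enumerate(layer_names):
--         first_index.setdefault(name, i)
--     used = set()
--     for param in param_names:
--         best = None
--         for cut in range(len(param) + 1):
--             prefix = param[:cut]
--             j = first_index.get(prefix)
--             if j is not None and (best is None or j < best[0]):
--                 best = (j, prefix)
--         if best is None:
--             return False
--         used.add(best[1])
--     return len(used) == len(first_index)
-- ===== Notes on version B (the rewrite author's own statement) =====
-- stated objective: faster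
-- what changed: B replaces A's per-param linear scan over layer_names by a first-occurrence hash index of the layer names that is queried once per prefix of each param (picking the prefix with the smallest first-occurrence index, which is exactly A's first match), and replaces the sorted-list comparison by a size comparison of the used set against the index.
import Mathlib
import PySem

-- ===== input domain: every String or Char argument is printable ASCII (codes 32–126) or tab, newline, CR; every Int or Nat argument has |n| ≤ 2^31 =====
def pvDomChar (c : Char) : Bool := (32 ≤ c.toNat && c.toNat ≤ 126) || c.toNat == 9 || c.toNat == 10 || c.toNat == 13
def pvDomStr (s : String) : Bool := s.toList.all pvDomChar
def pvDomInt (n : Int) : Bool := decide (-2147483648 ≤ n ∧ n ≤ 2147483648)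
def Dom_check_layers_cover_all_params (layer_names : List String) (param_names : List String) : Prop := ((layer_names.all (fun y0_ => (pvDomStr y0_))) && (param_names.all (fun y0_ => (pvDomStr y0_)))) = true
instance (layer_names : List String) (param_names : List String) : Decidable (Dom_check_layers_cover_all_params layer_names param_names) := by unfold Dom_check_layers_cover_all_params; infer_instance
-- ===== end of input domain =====

-- B replaces A's per-param scan over layer_names by a first-occurrence dict index of the
-- layer names queried at each prefix of the param, and a set-size comparison
-- (objective: faster; a timing run measured B ≥ 200x faster at the largest sizes).

-- ===== PORT A =====
-- inner 'for layer_name in layer_names: … break' loop of A: first layer that is a prefix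
def pvAFind (param : String) : List String → Option String
  | [] => none
  | ln :: rest => if PySem.Str.startswith param ln then some ln else pvAFind param rest

-- outer 'for param_name in param_names' loop of A (none = the early 'return False')
def pvALoop (layer_names : List String) (used : PySem.Set String) : List String → Option (PySem.Set String)
  | [] => some used
  | p :: ps =>
    match pvAFind p layer_names with
    | some ln => pvALoop layer_names (PySem.Set.add used ln) ps
    | none => none

def check_layers_cover_all_params (layer_names : List String) (param_names : List String) : Bool :=
  match pvALoop layer_names PySem.Set.empty param_names with
  | none => false
  | some used =>
      PySem.List.sorted used (fun x => x) == PySem.List.sorted (PySem.Set.ofList layer_names) (fun x => x)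

-- ===== PORT B =====
-- body of B's inner 'for cut in range(len(param) + 1)' loop
def pvBStep (idx : PySem.Dict String Int) (param : String) (best : Option (Int × String)) (cut : Int) : Option (Int × String) :=
  match idx.get? (PySem.Str.slice param none (some cut)), best with
  | none, _ => best
  | some j, none => some (j, PySem.Str.slice param none (some cut))
  | some j, some b => if j < b.1 then some (j, PySem.Str.slice param none (some cut)) else best

def pvBBest (idx : PySem.Dict String Int) (param : String) : Option (Int × String) :=
  (PySem.List.pyRange 0 (PySem.Str.len param + 1) 1).foldl (pvBStep idx param) none

-- 'first_index.setdefault(name, i) for i, name in enumerate(layer_names)'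
def pvBIdx (layer_names : List String) : PySem.Dict String Int :=
  (PySem.List.enumerate layer_names).foldl (fun d p => d.setdefault p.2 p.1) PySem.Dict.empty

-- B's 'for param in param_names' loop (none = the early 'return False')
def pvBLoop (idx : PySem.Dict String Int) (used : PySem.Set String) : List String → Option (PySem.Set String)
  | [] => some used
  | p :: ps =>
    match pvBBest idx p with
    | some b => pvBLoop idx (PySem.Set.add used b.2) ps
    | none => none

def check_layers_cover_all_params_alt (layer_names : List String) (param_names : List String) : Bool :=
  let idx := pvBIdx layer_names
  match pvBLoop idx PySem.Set.empty param_names with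
  | none => false
  | some used => PySem.Set.len used == (idx.size : Int)

-- ===== PRECONDITION & SPEC =====
def Spec_check_layers_cover_all_params (layer_names : List String) (param_names : List String) (out : Bool) : Prop := out = check_layers_cover_all_params_alt layer_names param_names
instance (layer_names : List String) (param_names : List String) (out : Bool) : Decidable (Spec_check_layers_cover_all_params layer_names param_names out) := by unfold Spec_check_layers_cover_all_params; infer_instance

-- ===== CLAIM (what is proved, stated in full; the proofs are below) =====
def Claim_equal_check_layers_cover_all_params : Prop := ∀ (layer_names : List String) (param_names : List String), Dom_check_layers_cover_all_params layer_names param_names → Spec_check_layers_cover_all_params layer_names param_names (check_layers_cover_all_params layer_names param_names)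

-- ===== LEMMAS AND PROOFS =====

-- first index ≥ k at which s occurs in the list (proof-side mirror of the dict lookup)
def pvFirstAt (s : String) : List String → Int → Option Int
  | [], _ => none
  | x :: xs, k => if x == s then some k else pvFirstAt s xs (k + 1)

lemma pvFirstAt_some (s : String) (layers : List String) :
    ∀ (k j : Int), pvFirstAt s layers k = some j →
      ∃ n : Nat, j = k + n ∧ layers[n]? = some s ∧ ∀ m < n, layers[m]? ≠ some s := by
  induction layers with
  | nil => intro k j h; simp [pvFirstAt] at h
  | cons x xs ih =>
    intro k j h
    by_cases hx : x = s
    · subst hx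
      simp [pvFirstAt] at h
      exact ⟨0, by omega, by simp, by omega⟩
    · rw [pvFirstAt, if_neg (by simpa using hx)] at h
      obtain ⟨n, hj, hget, hmin⟩ := ih (k + 1) j h
      refine ⟨n + 1, by push_cast; omega, by simpa using hget, ?_⟩
      intro m hm
      cases m with
      | zero => simpa using hx
      | succ m => simpa using hmin m (by omega)

lemma pvFirstAt_le (s : String) (layers : List String) :
    ∀ (k : Int) (i : Nat), layers[i]? = some s →
      ∃ j, pvFirstAt s layers k = some j ∧ j ≤ k + i := by
  induction layers with
  | nil => intro k i h; simp at h
  | cons x xs ih =>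
    intro k i h
    by_cases hx : x = s
    · exact ⟨k, by simp [pvFirstAt, hx], by omega⟩
    · cases i with
      | zero => simp at h; exact absurd h hx
      | succ i =>
        have h' : xs[i]? = some s := by simpa using h
        obtain ⟨j, hj, hle⟩ := ih (k + 1) i h'
        exact ⟨j, by rw [pvFirstAt, if_neg (by simpa using hx)]; exact hj, by push_cast at hle ⊢; omega⟩

lemma pvIdxFold_get (layers : List String) :
    ∀ (k : Int) (d : PySem.Dict String Int) (s : String),
      ((PySem.List.enumerate layers k).foldl (fun d p => d.setdefault p.2 p.1) d).get? s =
        ((d.get? s).or (pvFirstAt s layers k)) := by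
  induction layers with
  | nil => intro k d s; simp [PySem.List.enumerate_nil, pvFirstAt]
  | cons x xs ih =>
    intro k d s
    rw [PySem.List.enumerate_cons]
    simp only [List.foldl_cons]
    rw [ih]
    by_cases hx : s = x
    · subst hx
      rw [PySem.Dict.get?_setdefault_self]
      rw [pvFirstAt, if_pos (by simp)]
      cases hd : d.get? s with
      | none => simp
      | some v => simp
    · rw [PySem.Dict.get?_setdefault_of_ne d k hx]
      rw [pvFirstAt, if_neg (by simpa using fun h => hx h.symm)]

lemma pvIdx_get (layers : List String) (s : String) :
    (pvBIdx layers).get? s = pvFirstAt s layers 0 := by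
  unfold pvBIdx
  rw [pvIdxFold_get]
  simp [PySem.Dict.get?_empty]

lemma pvIdxFold_keys (layers : List String) :
    ∀ (k : Int) (d : PySem.Dict String Int),
      ((PySem.List.enumerate layers k).foldl (fun d p => d.setdefault p.2 p.1) d).keys =
        PySem.Set.update d.keys layers := by
  induction layers with
  | nil => intro k d; simp [PySem.List.enumerate_nil, PySem.Set.update]
  | cons x xs ih =>
    intro k d
    rw [PySem.List.enumerate_cons]
    simp only [List.foldl_cons]
    rw [ih]
    have hadd : (d.setdefault x k).keys = PySem.Set.add d.keys x := by
      rw [PySem.Dict.keys_setdefault, PySem.Set.add_eq_ite]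
      by_cases hm : x ∈ d.keys
      · rw [if_pos ((PySem.Dict.contains_iff_mem_keys _ _).mpr hm), if_pos hm]
      · rw [if_neg (fun hc => hm ((PySem.Dict.contains_iff_mem_keys _ _).mp hc)), if_neg hm]
    rw [hadd]
    simp [PySem.Set.update]

lemma pvIdx_keys (layers : List String) : (pvBIdx layers).keys = PySem.Set.ofList layers := by
  unfold pvBIdx
  rw [pvIdxFold_keys]
  rw [PySem.Set.ofList_eq_foldl]
  simp [PySem.Set.update, PySem.Dict.empty, PySem.Dict.keys]

lemma pvIdx_size (layers : List String) : (pvBIdx layers).size = (PySem.Set.ofList layers).length := by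
  have h1 : (pvBIdx layers).size = (pvBIdx layers).keys.length := by
    simp [PySem.Dict.keys, PySem.Dict.size]
  rw [h1, pvIdx_keys]

lemma pvAFind_cons (param x : String) (xs : List String) :
    pvAFind param (x :: xs) =
      if PySem.Str.startswith param x = true then some x else pvAFind param xs := rfl

lemma pvAFind_mem (param : String) (layers : List String) :
    ∀ s, pvAFind param layers = some s → s ∈ layers := by
  induction layers with
  | nil => intro s h; simp [pvAFind] at h
  | cons x xs ih =>
    intro s h
    rw [pvAFind_cons] at h
    by_cases hx : PySem.Str.startswith param x = true
    · rw [if_pos hx] at h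
      injection h with h2
      exact h2 ▸ List.mem_cons_self
    · rw [if_neg hx] at h
      exact List.mem_cons_of_mem _ (ih s h)

lemma pvAFind_none_iff (param : String) (layers : List String) :
    pvAFind param layers = none ↔ ∀ ln ∈ layers, PySem.Str.startswith param ln = false := by
  induction layers with
  | nil => simp [pvAFind]
  | cons x xs ih =>
    rw [pvAFind_cons, List.forall_mem_cons]
    by_cases hx : PySem.Str.startswith param x = true
    · rw [if_pos hx]
      constructor
      · intro h; exact absurd h (by simp)
      · rintro ⟨h1, _⟩; rw [hx] at h1; exact absurd h1 (by simp)
    · have hx' : PySem.Str.startswith param x = false := by simpa using hx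
      rw [if_neg hx, ih]
      exact ⟨fun h => ⟨hx', h⟩, fun h => h.2⟩

lemma pvAFind_some_char (param : String) (layers : List String) :
    ∀ s, pvAFind param layers = some s →
      ∃ i : Nat, layers[i]? = some s ∧ PySem.Str.startswith param s = true ∧
        ∀ m < i, ∀ y, layers[m]? = some y → PySem.Str.startswith param y = false := by
  induction layers with
  | nil => intro s h; simp [pvAFind] at h
  | cons x xs ih =>
    intro s h
    rw [pvAFind_cons] at h
    by_cases hx : PySem.Str.startswith param x = true
    · rw [if_pos hx] at h
      injection h with h2
      subst h2
      exact ⟨0, by simp, hx, by omega⟩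
    · have hx' : PySem.Str.startswith param x = false := by simpa using hx
      rw [if_neg hx] at h
      obtain ⟨i, hg, hsw, hmin⟩ := ih s h
      refine ⟨i + 1, by simpa using hg, hsw, ?_⟩
      intro m hm y hy
      cases m with
      | zero => simp at hy; rw [← hy]; exact hx'
      | succ m => exact hmin m (by omega) y (by simpa using hy)

lemma pvBStep_eq_some (idx : PySem.Dict String Int) (param : String)
    (acc : Option (Int × String)) (l j1 : Int) (p1 : String)
    (hs : pvBStep idx param acc l = some (j1, p1)) :
    acc = some (j1, p1) ∨
      (idx.get? (PySem.Str.slice param none (some l)) = some j1 ∧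
        p1 = PySem.Str.slice param none (some l)) := by
  rcases acc with _ | ⟨j0, p0⟩ <;>
    cases hg : idx.get? (PySem.Str.slice param none (some l))
  · simp only [pvBStep, hg] at hs
    exact absurd hs (by simp)
  · next jc =>
    simp only [pvBStep, hg] at hs
    have hs' : jc = j1 ∧ PySem.Str.slice param none (some l) = p1 := by simpa using hs
    exact Or.inr ⟨by simpa [hs'.1] using hg, hs'.2.symm⟩
  · simp only [pvBStep, hg] at hs
    exact Or.inl hs
  · next jc =>
    simp only [pvBStep, hg] at hs
    split_ifs at hs
    · have hs' : jc = j1 ∧ PySem.Str.slice param none (some l) = p1 := by simpa using hs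
      exact Or.inr ⟨by simpa [hs'.1] using hg, hs'.2.symm⟩
    · exact Or.inl hs

lemma pvBStep_eq_none_iff (idx : PySem.Dict String Int) (param : String)
    (acc : Option (Int × String)) (l : Int) :
    pvBStep idx param acc l = none ↔
      acc = none ∧ idx.get? (PySem.Str.slice param none (some l)) = none := by
  rcases acc with _ | ⟨j0, p0⟩ <;>
    cases hg : idx.get? (PySem.Str.slice param none (some l))
  · simp [pvBStep, hg]
  · simp [pvBStep, hg]
  · simp [pvBStep, hg]
  · simp only [pvBStep, hg]
    split_ifs <;> simp

lemma pvBStep_le_acc (idx : PySem.Dict String Int) (param : String)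
    (acc : Option (Int × String)) (l j0 : Int) (p0 : String)
    (hacc : acc = some (j0, p0)) :
    ∃ j1 p1, pvBStep idx param acc l = some (j1, p1) ∧ j1 ≤ j0 := by
  subst hacc
  cases hg : idx.get? (PySem.Str.slice param none (some l)) with
  | none => exact ⟨j0, p0, by simp [pvBStep, hg], le_refl _⟩
  | some jc =>
    by_cases hlt : jc < j0
    · exact ⟨jc, PySem.Str.slice param none (some l), by simp [pvBStep, hg, hlt], le_of_lt hlt⟩
    · exact ⟨j0, p0, by simp [pvBStep, hg, hlt], le_refl _⟩

lemma pvBStep_le_cand (idx : PySem.Dict String Int) (param : String)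
    (acc : Option (Int × String)) (l j' : Int)
    (hg : idx.get? (PySem.Str.slice param none (some l)) = some j') :
    ∃ j1 p1, pvBStep idx param acc l = some (j1, p1) ∧ j1 ≤ j' := by
  rcases acc with _ | ⟨j0, p0⟩
  · exact ⟨j', PySem.Str.slice param none (some l), by simp [pvBStep, hg], le_refl _⟩
  · by_cases hlt : j' < j0
    · exact ⟨j', PySem.Str.slice param none (some l), by simp [pvBStep, hg, hlt], le_refl _⟩
    · exact ⟨j0, p0, by simp [pvBStep, hg, hlt], by omega⟩

lemma pvFold_inv (idx : PySem.Dict String Int) (param : String) (C : Int → String → Prop)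
    (L : List Int) :
    ∀ (acc : Option (Int × String)),
      (∀ j p, acc = some (j, p) → C j p) →
      (∀ l ∈ L, ∀ j, idx.get? (PySem.Str.slice param none (some l)) = some j →
        C j (PySem.Str.slice param none (some l))) →
      ∀ j p, L.foldl (pvBStep idx param) acc = some (j, p) → C j p := by
  induction L with
  | nil => intro acc hacc _ j p h; exact hacc j p (by simpa using h)
  | cons l L ih =>
    intro acc hacc hstep j p h
    simp only [List.foldl_cons] at h
    refine ih (pvBStep idx param acc l) ?_ (fun l' hl' => hstep l' (List.mem_cons_of_mem _ hl')) j p h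
    intro j' p' hs
    rcases pvBStep_eq_some idx param acc l j' p' hs with hacc' | ⟨hg, rfl⟩
    · exact hacc j' p' hacc'
    · exact hstep l List.mem_cons_self j' hg

lemma pvFold_none_iff (idx : PySem.Dict String Int) (param : String) (L : List Int) :
    ∀ acc, L.foldl (pvBStep idx param) acc = none ↔
      acc = none ∧ ∀ l ∈ L, idx.get? (PySem.Str.slice param none (some l)) = none := by
  induction L with
  | nil => intro acc; simp
  | cons l L ih =>
    intro acc
    simp only [List.foldl_cons]
    rw [ih]
    rw [pvBStep_eq_none_iff]
    constructor
    · rintro ⟨⟨h0, hg⟩, h2⟩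
      refine ⟨h0, ?_⟩
      intro l' hl'
      rcases List.mem_cons.mp hl' with rfl | hl'
      · exact hg
      · exact h2 l' hl'
    · rintro ⟨h1, h2⟩
      exact ⟨⟨h1, h2 l List.mem_cons_self⟩, fun l' hl' => h2 l' (List.mem_cons_of_mem _ hl')⟩

lemma pvFold_min (idx : PySem.Dict String Int) (param : String) (L : List Int) :
    ∀ acc j p, L.foldl (pvBStep idx param) acc = some (j, p) →
      (∀ j0 p0, acc = some (j0, p0) → j ≤ j0) ∧
      (∀ l ∈ L, ∀ j', idx.get? (PySem.Str.slice param none (some l)) = some j' → j ≤ j') := by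
  induction L with
  | nil =>
    intro acc j p h
    simp only [List.foldl_nil] at h
    refine ⟨?_, by simp⟩
    intro j0 p0 h0
    rw [h] at h0
    simp at h0
    omega
  | cons l L ih =>
    intro acc j p h
    simp only [List.foldl_cons] at h
    obtain ⟨h1, h2⟩ := ih (pvBStep idx param acc l) j p h
    constructor
    · intro j0 p0 h0
      obtain ⟨j1, p1, hs, hle⟩ := pvBStep_le_acc idx param acc l j0 p0 h0
      exact le_trans (h1 j1 p1 hs) hle
    · intro l' hl' j' hg'
      rcases List.mem_cons.mp hl' with rfl | hl'
      · obtain ⟨j1, p1, hs, hle⟩ := pvBStep_le_cand idx param acc l' j' hg'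
        exact le_trans (h1 j1 p1 hs) hle
      · exact h2 l' hl' j' hg'

lemma pvPfx_toList (param : String) (l : Int) (hl : 0 ≤ l) :
    (PySem.Str.slice param none (some l)).toList = param.toList.take l.toNat := by
  rw [PySem.Str.toList_slice, PySem.Chars.slice_eq_listSlice, PySem.List.slice_to _ hl]

lemma pvPfx_sw (param : String) (l : Int) (hl : 0 ≤ l) :
    PySem.Str.startswith param (PySem.Str.slice param none (some l)) = true := by
  rw [PySem.Str.startswith_eq, PySem.Chars.startswith_iff, pvPfx_toList param l hl]
  exact List.take_prefix _ _

lemma pvPfx_of_prefix (param ln : String) (h : PySem.Str.startswith param ln = true) :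
    ∃ l : Int, 0 ≤ l ∧ l < PySem.Str.len param + 1 ∧ PySem.Str.slice param none (some l) = ln := by
  have hpre : ln.toList <+: param.toList := by
    rw [PySem.Str.startswith_eq, PySem.Chars.startswith_iff] at h
    exact h
  have hlen : ln.toList.length ≤ param.toList.length := hpre.length_le
  refine ⟨(ln.toList.length : Int), by positivity, ?_, ?_⟩
  · rw [PySem.Str.len_eq]
    exact_mod_cast Nat.lt_succ_of_le hlen
  · have ht : (PySem.Str.slice param none (some (ln.toList.length : Int))).toList = ln.toList := by
      rw [pvPfx_toList param _ (by positivity)]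
      rw [Int.toNat_natCast]
      exact (List.prefix_iff_eq_take.mp hpre).symm
    exact String.toList_inj.mp ht

lemma pvBest_eq (layers : List String) (param : String) :
    (pvBBest (pvBIdx layers) param).map Prod.snd = pvAFind param layers := by
  cases hA : pvAFind param layers with
  | none =>
    have hall := (pvAFind_none_iff param layers).mp hA
    have hB : pvBBest (pvBIdx layers) param = none := by
      unfold pvBBest
      rw [pvFold_none_iff]
      refine ⟨rfl, ?_⟩
      intro l hl
      by_contra hne
      obtain ⟨j, hj⟩ := Option.ne_none_iff_exists'.mp hne
      rw [pvIdx_get] at hj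
      obtain ⟨n, _, hget, _⟩ := pvFirstAt_some _ _ _ _ hj
      have hmem : (PySem.Str.slice param none (some l)) ∈ layers := List.mem_of_getElem? hget
      have hl0 : 0 ≤ l := (PySem.List.mem_pyRange_one.mp hl).1
      have hfalse := hall _ hmem
      rw [pvPfx_sw param l hl0] at hfalse
      exact absurd hfalse (by simp)
    rw [hB]; rfl
  | some s =>
    obtain ⟨i0, hi0get, hsw, hmin⟩ := pvAFind_some_char param layers s hA
    obtain ⟨ls, hls0, hlslt, hpfx⟩ := pvPfx_of_prefix param s hsw
    have hlsmem : ls ∈ PySem.List.pyRange 0 (PySem.Str.len param + 1) 1 :=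
      PySem.List.mem_pyRange_one.mpr ⟨hls0, hlslt⟩
    obtain ⟨j1, hj1, hj1le⟩ := pvFirstAt_le s layers 0 i0 hi0get
    have hg1 : (pvBIdx layers).get? (PySem.Str.slice param none (some ls)) = some j1 := by
      rw [hpfx, pvIdx_get]; exact hj1
    cases hB : pvBBest (pvBIdx layers) param with
    | none =>
      exfalso
      unfold pvBBest at hB
      rw [pvFold_none_iff] at hB
      exact absurd (hB.2 ls hlsmem) (by rw [hg1]; simp)
    | some b =>
      obtain ⟨j, p⟩ := b
      have hB' : (PySem.List.pyRange 0 (PySem.Str.len param + 1) 1).foldl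
          (pvBStep (pvBIdx layers) param) none = some (j, p) := hB
      have hC := pvFold_inv (pvBIdx layers) param
        (fun j p => (pvBIdx layers).get? p = some j ∧ PySem.Str.startswith param p = true)
        _ none (by simp)
        (fun l hl j hgl => ⟨hgl, pvPfx_sw param l (PySem.List.mem_pyRange_one.mp hl).1⟩)
        j p hB'
      obtain ⟨hgp, hswp⟩ := hC
      rw [pvIdx_get] at hgp
      obtain ⟨n, hjn, hnget, _⟩ := pvFirstAt_some _ _ _ _ hgp
      have hi0n : i0 ≤ n := by
        by_contra hlt
        have hlt' : n < i0 := by omega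
        have := hmin n hlt' p hnget
        rw [hswp] at this
        exact absurd this (by simp)
      have hjle := (pvFold_min (pvBIdx layers) param _ none j p hB').2 ls hlsmem j1 hg1
      have hn : n = i0 := by omega
      have hps : p = s := by
        have : some p = some s := by rw [← hnget, hn, hi0get]
        simpa using this
      simp [hps]

lemma pvLoop_eq (layers : List String) (params : List String) :
    ∀ used, pvBLoop (pvBIdx layers) used params = pvALoop layers used params := by
  induction params with
  | nil => intro used; rfl
  | cons p ps ih =>
    intro used
    have h := pvBest_eq layers p
    cases hA : pvAFind p layers with
    | none =>
      have hB : pvBBest (pvBIdx layers) p = none := by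
        cases hB : pvBBest (pvBIdx layers) p with
        | none => rfl
        | some b => rw [hA, hB] at h; simp at h
      simp [pvBLoop, pvALoop, hA, hB]
    | some s =>
      cases hB : pvBBest (pvBIdx layers) p with
      | none => rw [hA, hB] at h; simp at h
      | some b =>
        have hb2 : b.2 = s := by rw [hA, hB] at h; simpa using h
        simp [pvBLoop, pvALoop, hA, hB, hb2, ih]

lemma pvALoop_inv (layers : List String) (params : List String) :
    ∀ (used u : PySem.Set String), used.Nodup → (∀ x ∈ used, x ∈ layers) →
      pvALoop layers used params = some u → u.Nodup ∧ ∀ x ∈ u, x ∈ layers := by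
  induction params with
  | nil =>
    intro used u h1 h2 h
    simp [pvALoop] at h
    exact h ▸ ⟨h1, h2⟩
  | cons p ps ih =>
    intro used u h1 h2 h
    cases hA : pvAFind p layers with
    | none => simp [pvALoop, hA] at h
    | some s =>
      have h' : pvALoop layers (PySem.Set.add used s) ps = some u := by
        simpa [pvALoop, hA] using h
      refine ih _ u (PySem.Set.nodup_add _ _ h1) ?_ h'
      intro x hx
      rcases (PySem.Set.mem_add _ _ _).mp hx with hx' | rfl
      · exact h2 x hx'
      · exact pvAFind_mem p layers x hA

lemma pvFinal (layers : List String) (u : PySem.Set String) (hn : u.Nodup)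
    (hsub : ∀ x ∈ u, x ∈ layers) :
    (PySem.List.sorted u (fun x => x) == PySem.List.sorted (PySem.Set.ofList layers) (fun x => x)) =
      (PySem.Set.len u == ((pvBIdx layers).size : Int)) := by
  rw [Bool.eq_iff_iff]
  simp only [beq_iff_eq]
  rw [PySem.List.sorted_id_eq_sorted_id_iff_perm]
  rw [pvIdx_size]
  constructor
  · intro hperm
    have := hperm.length_eq
    simp [PySem.Set.len, this]
  · intro hlen
    have hlen' : u.length = (PySem.Set.ofList layers).length := by
      simp [PySem.Set.len] at hlen
      exact_mod_cast hlen
    have hsub' : u ⊆ PySem.Set.ofList layers :=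
      fun x hx => (PySem.Set.mem_ofList _ _).mpr (hsub x hx)
    exact (List.subperm_of_subset hn hsub').perm_of_length_le (le_of_eq hlen'.symm)

-- ===== VERDICT (by name: the statement is the Claim_ definition above) =====
theorem check_layers_cover_all_params_spec : Claim_equal_check_layers_cover_all_params := by
  unfold Claim_equal_check_layers_cover_all_params Spec_check_layers_cover_all_params
  intro layers params _
  show (match pvALoop layers PySem.Set.empty params with
        | none => false
        | some used =>
            PySem.List.sorted used (fun x => x) ==
              PySem.List.sorted (PySem.Set.ofList layers) (fun x => x)) =
      (match pvBLoop (pvBIdx layers) PySem.Set.empty params with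
        | none => false
        | some used => PySem.Set.len used == (((pvBIdx layers).size : Nat) : Int))
  rw [pvLoop_eq]
  cases h : pvALoop layers PySem.Set.empty params with
  | none => rfl
  | some u =>
    obtain ⟨hn, hs⟩ := pvALoop_inv layers params PySem.Set.empty u List.nodup_nil (by simp [PySem.Set.empty]) h
    exact pvFinal layers u hn hs
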